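-- pv_equiv track=rewrite | github.com/pypi-data/pypi-mirror-397 | packages/qim3d/qim3d-1.4.0.tar.gz/qim3d-1.4.0/qim3d/tests/__init__.py | merge_code_blocks
-- ===== SOURCE A (Python) =====
-- def merge_code_blocks(code_blocks):
--     """
--     Merge code blocks such that every time there is an 'import qim3d',
--     a new code block starts, and all preceding code blocks are merged into the previous one.
--     """
--     merged_blocks = []
--     current_block = ""
--
--     for block in code_blocks:
--         if "import qim3d" in block:
--
--             # If there's an existing block, add it to the merged list
--             if current_block.strip():
--                 merged_blocks.append(current_block.strip())
--
--             # Start a new block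
--             current_block = block
--         else:
--             # Append to the current block
--             current_block += "\n" + block
--
--     # Add the last block if it exists
--     if current_block.strip():
--         merged_blocks.append(current_block.strip())
--
--     return merged_blocks
-- ===== SOURCE B (Python) =====
-- def merge_code_blocks(code_blocks):
--     """
--     Merge code blocks such that every time there is an 'import qim3d',
--     a new code block starts, and all preceding code blocks are merged into the previous one.
--     """
--     n = len(code_blocks)
--     bounds = [i for i, block in enumerate(code_blocks) if "import qim3d" in block] + [n]
--     merged = []
--     start = 0
--     for stop in bounds:
--         text = "\n".join(code_blocks[start:stop]).strip()
--         if text: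
--             merged.append(text)
--         start = stop
--     return merged
-- ===== Notes on version B (the rewrite author's own statement) =====
-- stated objective: alternative
-- what changed: Replaces A's single stateful pass that accumulates a growing current-block string with a two-phase index computation: first collect the boundary indices of blocks containing 'import qim3d', then join-and-strip each slice of the input between consecutive boundaries.
import Mathlib
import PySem

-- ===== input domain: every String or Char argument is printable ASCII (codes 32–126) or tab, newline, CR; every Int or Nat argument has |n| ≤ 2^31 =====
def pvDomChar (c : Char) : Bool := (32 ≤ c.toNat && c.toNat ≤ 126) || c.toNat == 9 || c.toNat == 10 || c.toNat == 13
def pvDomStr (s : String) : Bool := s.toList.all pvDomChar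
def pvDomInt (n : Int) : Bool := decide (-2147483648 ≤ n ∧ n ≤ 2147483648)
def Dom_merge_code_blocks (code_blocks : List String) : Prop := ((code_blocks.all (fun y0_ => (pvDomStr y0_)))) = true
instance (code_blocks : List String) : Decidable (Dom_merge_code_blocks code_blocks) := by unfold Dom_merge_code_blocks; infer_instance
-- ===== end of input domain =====

-- B replaces A's single stateful string-accumulating pass by computing the boundary indices of
-- the 'import qim3d' blocks first and then join-and-stripping each slice between consecutive
-- boundaries (alternative decomposition, same cost).

-- ===== PORT A =====
def merge_code_blocks (code_blocks : List String) : List String :=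
  let st := code_blocks.foldl
    (fun (acc : List String × String) block =>
      if PySem.Str.isIn "import qim3d" block then
        (if PySem.Str.strip acc.2 ≠ "" then acc.1 ++ [PySem.Str.strip acc.2] else acc.1, block)
      else
        (acc.1, acc.2 ++ "\n" ++ block))
    ([], "")
  if PySem.Str.strip st.2 ≠ "" then st.1 ++ [PySem.Str.strip st.2] else st.1

-- ===== PORT B =====
def merge_code_blocks_alt (code_blocks : List String) : List String :=
  let n : Int := code_blocks.length
  let bounds := (((PySem.List.enumerate code_blocks).filter
      (fun p => PySem.Str.isIn "import qim3d" p.2)).map (fun p => p.1)) ++ [n]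
  let st := bounds.foldl
    (fun (acc : List String × Int) stop =>
      let text := PySem.Str.strip (PySem.Str.join "\n"
        (PySem.List.slice code_blocks (some acc.2) (some stop)))
      (if text ≠ "" then acc.1 ++ [text] else acc.1, stop))
    ([], 0)
  st.1

-- ===== PRECONDITION & SPEC =====
def Spec_merge_code_blocks (code_blocks : List String) (out : List String) : Prop := out = merge_code_blocks_alt code_blocks
instance (code_blocks : List String) (out : List String) : Decidable (Spec_merge_code_blocks code_blocks out) := by unfold Spec_merge_code_blocks; infer_instance

-- ===== CLAIM (what is proved, stated in full; the proofs are below) =====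
def Claim_equal_merge_code_blocks : Prop := ∀ (code_blocks : List String), Dom_merge_code_blocks code_blocks → Spec_merge_code_blocks code_blocks (merge_code_blocks code_blocks)

-- ===== LEMMAS AND PROOFS =====

-- A's way of extending the current block with blocks r, starting from string c
def pvPj (c : String) (r : List String) : String := r.foldl (fun c b => c ++ "\n" ++ b) c

-- does the block contain "import qim3d"?
def pvImp (b : String) : Bool := PySem.Str.isIn "import qim3d" b

-- split the block list into (run before the first import block, segments each headed by an import block)
def pvSpl : List String → List String × List (List String)
  | [] => ([], [])
  | b :: bs =>
    if pvImp b then ([], (b :: (pvSpl bs).1) :: (pvSpl bs).2)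
    else (b :: (pvSpl bs).1, (pvSpl bs).2)

def pvFilt (l : List String) : List String := l.filter (fun s => s ≠ "")

-- join a segment with newlines and strip it
def pvJS (seg : List String) : String := PySem.Str.strip (PySem.Str.join "\n" seg)

-- A's loop body and trailing emit, named
def pvStepA (acc : List String × String) (block : String) : List String × String :=
  if PySem.Str.isIn "import qim3d" block then
    (if PySem.Str.strip acc.2 ≠ "" then acc.1 ++ [PySem.Str.strip acc.2] else acc.1, block)
  else (acc.1, acc.2 ++ "\n" ++ block)

def pvEmit (st : List String × String) : List String :=
  if PySem.Str.strip st.2 ≠ "" then st.1 ++ [PySem.Str.strip st.2] else st.1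

-- B's boundary-index list with explicit enumeration start, and B's loop body, named
def pvStarts (ys : List String) (s : Int) : List Int :=
  ((PySem.List.enumerate ys s).filter (fun p => PySem.Str.isIn "import qim3d" p.2)).map (fun p => p.1)

def pvStepB (X : List String) (acc : List String × Int) (stop : Int) : List String × Int :=
  let text := PySem.Str.strip (PySem.Str.join "\n" (PySem.List.slice X (some acc.2) (some stop)))
  (if text ≠ "" then acc.1 ++ [text] else acc.1, stop)

lemma pvChars_join_glue (sep p q : List Char) (rest : List (List Char)) :
    PySem.Chars.join sep ((p ++ sep ++ q) :: rest) = p ++ sep ++ PySem.Chars.join sep (q :: rest) := by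
  cases rest with
  | nil => simp [PySem.Chars.join_singleton]
  | cons a t => rw [PySem.Chars.join_cons_cons, PySem.Chars.join_cons_cons]; simp [List.append_assoc]

lemma pvPj_eq_join (r : List String) (c : String) :
    pvPj c r = PySem.Str.join "\n" (c :: r) := by
  induction r generalizing c with
  | nil =>
    apply String.toList_inj.mp
    simp [pvPj, PySem.Str.toList_join, PySem.Chars.join_singleton]
  | cons b r ih =>
    have h1 : pvPj c (b :: r) = pvPj (c ++ "\n" ++ b) r := by simp [pvPj]
    rw [h1, ih]
    apply String.toList_inj.mp
    simp only [PySem.Str.toList_join, List.map_cons, String.toList_append]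
    rw [pvChars_join_glue, PySem.Chars.join_cons_cons]

lemma pv_strip_newline (l : List Char) :
    PySem.Chars.strip ('\n' :: l) = PySem.Chars.strip l := by
  have h : PySem.Chars.isspace '\n' = true := by decide
  simp [PySem.Chars.strip, PySem.Chars.lstrip, List.dropWhile, h]

lemma pv_strip_empty_head (r : List String) :
    PySem.Str.strip (pvPj "" r) = PySem.Str.strip (PySem.Str.join "\n" r) := by
  cases r with
  | nil => rfl
  | cons b r =>
    rw [pvPj_eq_join]
    apply String.toList_inj.mp
    simp only [PySem.Str.toList_strip, PySem.Str.toList_join, List.map_cons,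
      PySem.Chars.join_cons_cons]
    have h1 : ("" : String).toList = [] := rfl
    have h2 : ("\n" : String).toList = ['\n'] := rfl
    rw [h1, h2]
    simp [pv_strip_newline]

lemma pvFilt_cons (a : String) (l : List String) :
    pvFilt (a :: l) = (if a ≠ "" then [a] else []) ++ pvFilt l := by
  simp [pvFilt, List.filter_cons]; split <;> simp_all

-- A's loop, characterised by the segment split
lemma pvGA (bs : List String) : ∀ (m : List String) (c : String),
    pvEmit (bs.foldl pvStepA (m, c))
    = m ++ pvFilt (PySem.Str.strip (pvPj c (pvSpl bs).1) :: (pvSpl bs).2.map pvJS) := by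
  induction bs with
  | nil =>
    intro m c
    by_cases h : PySem.Str.strip c = "" <;>
      simp [pvEmit, pvFilt, pvSpl, pvPj, h]
  | cons b bs ih =>
    intro m c
    by_cases hb : pvImp b
    · have hb' : PySem.Str.isIn "import qim3d" b = true := hb
      rw [List.foldl_cons]
      have hstep : pvStepA (m, c) b =
          (if PySem.Str.strip c ≠ "" then m ++ [PySem.Str.strip c] else m, b) := by
        rw [pvStepA, if_pos hb']
      rw [hstep, ih]
      have hspl : pvSpl (b :: bs) = ([], (b :: (pvSpl bs).1) :: (pvSpl bs).2) := by
        simp [pvSpl, hb]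
      rw [hspl]
      have hjoin : PySem.Str.strip (pvPj b (pvSpl bs).1) = pvJS (b :: (pvSpl bs).1) := by
        rw [pvJS, pvPj_eq_join]
      rw [hjoin, show pvPj c [] = c from rfl, List.map_cons, pvFilt_cons (PySem.Str.strip c)]
      by_cases h : PySem.Str.strip c = "" <;> simp [h, List.append_assoc]
    · have hb' : PySem.Str.isIn "import qim3d" b = false := by
        simpa [pvImp] using hb
      rw [List.foldl_cons]
      have hstep : pvStepA (m, c) b = (m, c ++ "\n" ++ b) := by
        rw [pvStepA, if_neg (by rw [hb']; exact Bool.false_ne_true)]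
      rw [hstep, ih]
      have hspl : pvSpl (b :: bs) = (b :: (pvSpl bs).1, (pvSpl bs).2) := by
        simp [pvSpl, hb]
      rw [hspl]
      have : pvPj c (b :: (pvSpl bs).1) = pvPj (c ++ "\n" ++ b) (pvSpl bs).1 := by simp [pvPj]
      rw [this]

lemma pvStarts_cons (y : String) (ys : List String) (s : Int) :
    pvStarts (y :: ys) s = (if pvImp y then [s] else []) ++ pvStarts ys (s + 1) := by
  rw [pvStarts, PySem.List.enumerate_cons, List.filter_cons]
  by_cases h : pvImp y
  · have h' : PySem.Str.isIn "import qim3d" y = true := h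
    simp only [h', h, if_true, List.map_cons, pvStarts]
    simp
  · have h' : PySem.Str.isIn "import qim3d" y = false := by
      simpa [pvImp] using h
    simp only [h', h, Bool.false_eq_true, if_false, pvStarts]
    simp

-- the slice between consecutive boundaries is exactly the middle segment
lemma pvSlice_mid (pre cur ys : List String) :
    PySem.List.slice (pre ++ cur ++ ys) (some ((pre.length : Nat) : Int))
      (some ((pre.length + cur.length : Nat) : Int)) = cur := by
  rw [PySem.List.slice_natCast]
  rw [List.append_assoc, List.drop_left]
  simp

-- B's loop, characterised by the segment split
lemma pvGB (X : List String) (ys : List String) : ∀ (pre cur out : List String),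
    X = pre ++ cur ++ ys →
    ((pvStarts ys ((pre.length + cur.length : Nat) : Int) ++ [(X.length : Int)]).foldl
      (pvStepB X) (out, ((pre.length : Nat) : Int))).1
    = out ++ pvFilt (pvJS (cur ++ (pvSpl ys).1) :: (pvSpl ys).2.map pvJS) := by
  induction ys with
  | nil =>
    intro pre cur out hX
    have hlen : (X.length : Int) = ((pre.length + cur.length : Nat) : Int) := by
      subst hX; simp
    have hstarts : pvStarts [] ((pre.length + cur.length : Nat) : Int) = [] := by
      simp [pvStarts, PySem.List.enumerate]
    rw [hstarts, List.nil_append, hlen]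
    have hslice := pvSlice_mid pre cur []
    rw [List.foldl_cons, List.foldl_nil, pvStepB]
    subst hX
    simp only [hslice]
    rw [pvSpl]
    by_cases h : pvJS cur = ""
    · simp only [pvJS] at h
      simp [pvFilt, pvJS, h]
    · simp only [pvJS] at h
      simp [pvFilt, pvJS, h]
  | cons y ys ih =>
    intro pre cur out hX
    have hX' : X = pre ++ cur ++ [y] ++ ys := by simp [hX]
    have hX'' : X = pre ++ (cur ++ [y]) ++ ys := by simp [hX]
    by_cases hy : pvImp y
    · rw [pvStarts_cons, if_pos hy]
      simp only [List.nil_append, List.cons_append, List.foldl_cons]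
      have hslice := pvSlice_mid pre cur ([y] ++ ys)
      rw [show pre ++ cur ++ ([y] ++ ys) = X by rw [hX]; simp] at hslice
      have hstep : pvStepB X (out, ((pre.length : Nat) : Int)) ((pre.length + cur.length : Nat) : Int)
          = (if pvJS cur ≠ "" then out ++ [pvJS cur] else out, ((pre.length + cur.length : Nat) : Int)) := by
        rw [pvStepB]
        simp only [hslice, pvJS]
      rw [hstep]
      have hoff : ((pre.length + cur.length : Nat) : Int) + 1
          = (((pre ++ cur).length + ([y] : List String).length : Nat) : Int) := by
        simp only [List.length_append, List.length_singleton]; push_cast; ring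
      have hpos : ((pre.length + cur.length : Nat) : Int) = (((pre ++ cur).length : Nat) : Int) := by
        simp [List.length_append]
      rw [hoff, hpos, ih (pre ++ cur) [y] _ hX']
      have hspl : pvSpl (y :: ys) = ([], (y :: (pvSpl ys).1) :: (pvSpl ys).2) := by
        simp [pvSpl, hy]
      rw [hspl]
      simp only [List.append_nil, List.singleton_append, List.map_cons]
      rw [pvFilt_cons (pvJS cur)]
      by_cases h : pvJS cur = "" <;> simp [h, List.append_assoc]
    · rw [pvStarts_cons, if_neg hy, List.nil_append]
      have hoff : ((pre.length + cur.length : Nat) : Int) + 1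
          = ((pre.length + (cur ++ [y]).length : Nat) : Int) := by
        simp only [List.length_append, List.length_singleton]; push_cast; ring
      rw [hoff, ih pre (cur ++ [y]) _ hX'']
      have hspl : pvSpl (y :: ys) = (y :: (pvSpl ys).1, (pvSpl ys).2) := by
        simp [pvSpl, hy]
      rw [hspl]
      simp [List.append_assoc]

-- ===== VERDICT (by name: the statement is the Claim_ definition above) =====
theorem merge_code_blocks_spec : Claim_equal_merge_code_blocks := by
  intro xs _
  unfold Spec_merge_code_blocks
  have hA : merge_code_blocks xs = pvEmit (xs.foldl pvStepA ([], "")) := rfl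
  have hB : merge_code_blocks_alt xs
      = ((pvStarts xs (((([]:List String).length + ([]:List String).length : Nat)) : Int)
          ++ [(xs.length : Int)]).foldl (pvStepB xs) ([], ((([]:List String).length : Nat) : Int))).1 := rfl
  rw [hA, hB, pvGA, pvGB xs xs [] [] [] (by simp)]
  simp [pvJS, pv_strip_empty_head]
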